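-- pv_equiv track=rewrite | github.com/YelamanKarassay/Assignment_drafts | main.py | exercise_5
-- ===== SOURCE A (Python) =====
-- def exercise_5(n):
--     a, c = 10, 0
--     while a > 0:
--         for i in range(a):
--             b = 1
--             while b < n:
--                 n -= 1
--                 c += 1
--         a -= 1
--     return c
-- ===== SOURCE B (Python) =====
-- def exercise_5(n):
--     # Closed form: the first inner pass drains n down to 1 (n-1 decrements),
--     # every later pass is a no-op, so the count is max(0, n-1).
--     return n - 1 if n > 1 else 0
-- ===== Notes on version B (the rewrite author's own statement) =====
-- stated objective: faster
-- what changed: Replaced the triple nested loop (which only ever drains n to 1 on its first inner pass) by the closed form max(0, n-1).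
import Mathlib
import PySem

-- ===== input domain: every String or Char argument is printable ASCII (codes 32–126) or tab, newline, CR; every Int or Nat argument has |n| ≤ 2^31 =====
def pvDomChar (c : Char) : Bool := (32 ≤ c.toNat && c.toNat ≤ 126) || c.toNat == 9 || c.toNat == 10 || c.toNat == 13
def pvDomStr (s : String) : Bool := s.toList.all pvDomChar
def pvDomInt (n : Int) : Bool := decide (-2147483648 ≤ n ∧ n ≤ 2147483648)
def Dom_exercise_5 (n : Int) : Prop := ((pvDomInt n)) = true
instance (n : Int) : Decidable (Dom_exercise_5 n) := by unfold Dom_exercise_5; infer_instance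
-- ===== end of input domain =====

-- B replaces A's triple nested loop by the closed form max(0, n-1); objective: faster (O(1) vs O(n)).

-- ===== PORT A =====
-- inner 'while b < n: n -= 1; c += 1' (b stays 1)
def pvDrain (n c : Int) : Int × Int :=
  if 1 < n then pvDrain (n - 1) (c + 1) else (n, c)
termination_by (n - 1).toNat
decreasing_by omega

-- 'for i in range(a): …' over the loop state (n, c)
def pvForPass (a n c : Int) : Int × Int :=
  (PySem.List.pyRange 0 a 1).foldl (fun s _ => pvDrain s.1 s.2) (n, c)

-- 'while a > 0: …; a -= 1', returning c
def pvOuter (a n c : Int) : Int :=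
  if 0 < a then
    let s := pvForPass a n c
    pvOuter (a - 1) s.1 s.2
  else c
termination_by a.toNat
decreasing_by omega

def exercise_5 (n : Int) : Int := pvOuter 10 n 0

-- ===== PORT B =====
def exercise_5_alt (n : Int) : Int := if 1 < n then n - 1 else 0

-- ===== PRECONDITION & SPEC =====
def Spec_exercise_5 (n : Int) (out : Int) : Prop := out = exercise_5_alt n
instance (n : Int) (out : Int) : Decidable (Spec_exercise_5 n out) := by unfold Spec_exercise_5; infer_instance

-- ===== CLAIM (what is proved, stated in full; the proofs are below) =====
def Claim_equal_exercise_5 : Prop := ∀ (n : Int), Dom_exercise_5 n → Spec_exercise_5 n (exercise_5 n)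

-- ===== LEMMAS AND PROOFS =====

theorem pvDrain_spec (n c : Int) :
    pvDrain n c = if 1 < n then (1, c + (n - 1)) else (n, c) := by
  by_cases h : 1 < n
  · have hm : (n - 1).toNat > 0 := by omega
    induction hn : (n - 1).toNat generalizing n c with
    | zero => omega
    | succ k ih =>
      rw [pvDrain, if_pos h]
      by_cases h' : 1 < n - 1
      · rw [ih (n - 1) (c + 1) h' (by omega) (by omega), if_pos h', if_pos h]
        have : c + 1 + (n - 1 - 1) = c + (n - 1) := by ring
        rw [this]
      · rw [pvDrain, if_neg h', if_pos h]
        have : n - 1 = 1 := by omega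
        simp [this]
  · rw [pvDrain, if_neg h, if_neg h]

theorem pvDrain_fixed (n c : Int) (h : ¬ 1 < n) : pvDrain n c = (n, c) := by
  rw [pvDrain, if_neg h]

theorem pvForPass_fixed (a n c : Int) (h : ¬ 1 < n) : pvForPass a n c = (n, c) := by
  unfold pvForPass
  induction PySem.List.pyRange 0 a 1 with
  | nil => rfl
  | cons x xs ih => simp [List.foldl, pvDrain_fixed n c h, ih]

theorem pvOuter_fixed (a n c : Int) (h : ¬ 1 < n) : pvOuter a n c = c := by
  by_cases ha : 0 < a
  · induction hk : a.toNat generalizing a with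
    | zero => omega
    | succ k ih =>
      rw [pvOuter, if_pos ha, pvForPass_fixed a n c h]
      by_cases ha' : 0 < a - 1
      · exact ih (a - 1) ha' (by omega)
      · rw [pvOuter, if_neg ha']
  · rw [pvOuter, if_neg ha]

theorem pvForPass_first (n c : Int) :
    pvForPass 10 n c = if 1 < n then (1, c + (n - 1)) else (n, c) := by
  by_cases h : 1 < n
  · rw [if_pos h]
    unfold pvForPass
    rw [show PySem.List.pyRange 0 10 1 = [0,1,2,3,4,5,6,7,8,9] from by decide]
    simp only [List.foldl]
    rw [pvDrain_spec n c, if_pos h]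
    simp [pvDrain_fixed 1 (c + (n - 1)) (by omega)]
  · rw [if_neg h]; exact pvForPass_fixed 10 n c h

-- ===== VERDICT (by name: the statement is the Claim_ definition above) =====
theorem exercise_5_spec : Claim_equal_exercise_5 := by
  intro n _
  unfold Spec_exercise_5 exercise_5 exercise_5_alt
  rw [pvOuter, if_pos (by norm_num), pvForPass_first]
  by_cases h : 1 < n
  · rw [if_pos h, if_pos h]
    simpa using pvOuter_fixed 9 1 (0 + (n - 1)) (by omega)
  · rw [if_neg h, if_neg h]
    exact pvOuter_fixed 9 n 0 h
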